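-- pv_equiv track=rewrite | github.com/godinghunak/envault | envault/env_heredoc.py | find_heredocs
-- ===== SOURCE A (Python) =====
-- from typing import Dict, List, Optional, Tuple
--
-- def find_heredocs(text: str) -> List[Tuple[str, str]]:
--     """Return list of (key, multiline_value) pairs found via heredoc syntax.
--
--     Supports the pattern:
--         KEY=<<EOF
--         line1
--         line2
--         EOF
--     """
--     results: List[Tuple[str, str]] = []
--     lines = text.splitlines()
--     i = 0
--     while i < len(lines):
--         line = lines[i]
--         if "=<<" in line:
--             key, _, marker = line.partition("=<<")
--             key = key.strip()
--             marker = marker.strip()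
--             if key and marker:
--                 body_lines: List[str] = []
--                 i += 1
--                 while i < len(lines) and lines[i].strip() != marker:
--                     body_lines.append(lines[i])
--                     i += 1
--                 results.append((key, "\n".join(body_lines)))
--         i += 1
--     return results
-- ===== SOURCE B (Python) =====
-- from typing import List, Tuple
--
-- def find_heredocs(text: str) -> List[Tuple[str, str]]:
--     results: List[Tuple[str, str]] = []
--     current_key = None
--     current_marker = None
--     body_lines: List[str] = []
--     for line in text.splitlines():
--         if current_key is None:
--             if "=<<" in line:
--                 key, _, marker = line.partition("=<<")
--                 key = key.strip()
--                 marker = marker.strip()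
--                 if key and marker:
--                     current_key, current_marker = key, marker
--                     body_lines = []
--         else:
--             if line.strip() == current_marker:
--                 results.append((current_key, "\n".join(body_lines)))
--                 current_key = None
--             else:
--                 body_lines.append(line)
--     if current_key is not None:
--         results.append((current_key, "\n".join(body_lines)))
--     return results
-- ===== Notes on version B (the rewrite author's own statement) =====
-- stated objective: alternative
-- what changed: Replaced the index-driven outer while with a nested inner while and a shared mutable index by a flat single-pass state machine over splitlines() carrying (current_key, current_marker, body buffer) and flushing an unterminated heredoc after the loop.
import Mathlib
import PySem

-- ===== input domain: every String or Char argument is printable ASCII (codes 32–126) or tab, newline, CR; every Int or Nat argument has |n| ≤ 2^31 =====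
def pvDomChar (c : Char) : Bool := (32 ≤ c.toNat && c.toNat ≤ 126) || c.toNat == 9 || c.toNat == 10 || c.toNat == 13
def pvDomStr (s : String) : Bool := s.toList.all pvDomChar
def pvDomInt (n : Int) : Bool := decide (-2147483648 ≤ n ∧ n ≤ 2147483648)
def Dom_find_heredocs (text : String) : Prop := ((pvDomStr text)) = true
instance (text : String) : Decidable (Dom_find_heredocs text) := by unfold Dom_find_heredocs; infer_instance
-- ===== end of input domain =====

-- B rewrites A's index-driven outer-while-with-inner-while as a flat single-pass state machine; alternative decomposition, same cost.

-- ===== PORT A =====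
-- line.partition("=<<") with both pieces stripped; exact when "=<<" occurs in line (the only case it is used in)
def pvKeyMarker (line : String) : String × String :=
  let j : Int := PySem.Str.find line "=<<"
  (PySem.Str.strip (PySem.Str.slice line none (some j)),
   PySem.Str.strip (PySem.Str.slice line (some (j + 3)) none))

-- the inner while: collects body lines until a line strips to the marker; returns (body, lines after the marker line — the outer i+=1 skips it)
def pvTakeBody (marker : String) : List String → List String × List String
  | [] => ([], [])
  | l :: rest =>
    if PySem.Str.strip l = marker then ([], rest)
    else
      let p := pvTakeBody marker rest
      (l :: p.1, p.2)

theorem pvTakeBody_len (marker : String) (xs : List String) :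
    (pvTakeBody marker xs).2.length ≤ xs.length := by
  induction xs with
  | nil => simp [pvTakeBody]
  | cons l rest ih =>
    simp only [pvTakeBody]
    split
    · simp
    · simp; omega

def pvGoA : List String → List (String × String)
  | [] => []
  | line :: rest =>
    if PySem.Str.isIn "=<<" line then
      let km := pvKeyMarker line
      if km.1 ≠ "" ∧ km.2 ≠ "" then
        let p := pvTakeBody km.2 rest
        (km.1, PySem.Str.join "\n" p.1) :: pvGoA p.2
      else pvGoA rest
    else pvGoA rest
termination_by lines => lines.length
decreasing_by
  · have := pvTakeBody_len (pvKeyMarker line).2 rest; simp; omega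
  · simp
  · simp

def find_heredocs (text : String) : List (String × String) :=
  pvGoA (PySem.Str.splitlines text)

-- ===== PORT B =====
-- state machine: none = outside a heredoc; some (key, marker, body_lines) = inside one
def pvGoB : List String → Option (String × String × List String) → List (String × String)
  | [], none => []
  | [], some (k, _, body) => [(k, PySem.Str.join "\n" body)]
  | line :: rest, none =>
    if PySem.Str.isIn "=<<" line then
      let km := pvKeyMarker line
      if km.1 ≠ "" ∧ km.2 ≠ "" then pvGoB rest (some (km.1, km.2, []))
      else pvGoB rest none
    else pvGoB rest none
  | line :: rest, some (k, m, body) =>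
    if PySem.Str.strip line = m then (k, PySem.Str.join "\n" body) :: pvGoB rest none
    else pvGoB rest (some (k, m, body ++ [line]))

def find_heredocs_alt (text : String) : List (String × String) :=
  pvGoB (PySem.Str.splitlines text) none

-- ===== PRECONDITION & SPEC =====
def Spec_find_heredocs (text : String) (out : List (String × String)) : Prop := out = find_heredocs_alt text
instance (text : String) (out : List (String × String)) : Decidable (Spec_find_heredocs text out) := by unfold Spec_find_heredocs; infer_instance

-- ===== CLAIM (what is proved, stated in full; the proofs are below) =====
def Claim_equal_find_heredocs : Prop := ∀ (text : String), Dom_find_heredocs text → Spec_find_heredocs text (find_heredocs text)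

-- ===== LEMMAS AND PROOFS =====

-- while inside a heredoc, B emits the pending pair with A's collected body, then behaves like A on the remainder
theorem pvGoB_some (rest : List String)
    (ih : ∀ ys : List String, ys.length ≤ rest.length → pvGoA ys = pvGoB ys none)
    (k m : String) (body : List String) :
    pvGoB rest (some (k, m, body)) =
      (k, PySem.Str.join "\n" (body ++ (pvTakeBody m rest).1)) :: pvGoA (pvTakeBody m rest).2 := by
  induction rest generalizing body with
  | nil => simp [pvGoB, pvTakeBody, pvGoA]
  | cons l rest ih2 =>
    have ih' : ∀ ys : List String, ys.length ≤ rest.length → pvGoA ys = pvGoB ys none :=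
      fun ys h => ih ys (by simp; omega)
    by_cases h : PySem.Str.strip l = m
    · simp [pvGoB, pvTakeBody, h, ih' rest (le_refl _)]
    · simp only [pvGoB, pvTakeBody, if_neg h]
      rw [ih2 ih' (body ++ [l])]
      simp

theorem pvGoA_eq_pvGoB (n : Nat) (lines : List String) (h : lines.length ≤ n) :
    pvGoA lines = pvGoB lines none := by
  induction n generalizing lines with
  | zero =>
    have : lines = [] := List.length_eq_zero_iff.mp (Nat.le_zero.mp h)
    subst this; simp [pvGoA, pvGoB]
  | succ n ih =>
    match lines with
    | [] => simp [pvGoA, pvGoB]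
    | line :: rest =>
      have hr : rest.length ≤ n := by simp at h; omega
      by_cases hin : PySem.Str.isIn "=<<" line
      · by_cases hkm : (pvKeyMarker line).1 ≠ "" ∧ (pvKeyMarker line).2 ≠ ""
        · simp only [pvGoA, pvGoB, if_pos hin, if_pos hkm]
          rw [pvGoB_some rest (fun ys hy => ih ys (le_trans hy hr)) _ _ []]
          simp
        · simp only [pvGoA, pvGoB, if_pos hin, if_neg hkm]
          exact ih rest hr
      · simp only [pvGoA, pvGoB, if_neg hin]
        exact ih rest hr

-- ===== VERDICT (by name: the statement is the Claim_ definition above) =====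
theorem find_heredocs_spec : Claim_equal_find_heredocs := by
  intro text _
  unfold Spec_find_heredocs find_heredocs find_heredocs_alt
  exact pvGoA_eq_pvGoB _ _ (le_refl _)
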